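-- pv_equiv track=rewrite | github.com/Sossio699/Deep-Learning-Project | Datasets.py | cfq_decompose_output
-- ===== SOURCE A (Python) =====
-- def cfq_decompose_output(line):
--     tokens = line.split(" ")
--     prefix = ""
--     postfix = ""
--     triplets_text = ""
--     state = 0
--     for token in tokens:
--         if state == 0:
--             if token == "{":
--                 prefix += token + " "
--                 state = 1
--             else:
--                 prefix += token + " "
--         elif state == 1:
--             if token == "}":
--                 postfix += token + " "
--                 state = 2
--             else:
--                 triplets_text += token + " "
--         else:
--             postfix += token + " "
--     triplets = triplets_text.strip().split(" . ")
--     return prefix, triplets, postfix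
-- ===== SOURCE B (Python) =====
-- def cfq_decompose_output(line):
--     tokens = line.split(" ")
--     if "{" in tokens:
--         i = tokens.index("{")
--         head, rest = tokens[:i + 1], tokens[i + 1:]
--         if "}" in rest:
--             j = rest.index("}")
--             mid, post = rest[:j], rest[j:]
--         else:
--             mid, post = rest, []
--     else:
--         head, mid, post = tokens, [], []
--     prefix = " ".join(head) + " "
--     postfix = " ".join(post) + " " if post else ""
--     triplets = " ".join(mid).strip().split(" . ")
--     return prefix, triplets, postfix
-- ===== Notes on version B (the rewrite author's own statement) =====
-- stated objective: simpler
-- what changed: Replaced A's token-by-token state machine with accumulator strings by an index-then-slice decomposition: find the first '{' and the first following '}', slice the token list into three groups, and join each group once.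
import Mathlib
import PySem

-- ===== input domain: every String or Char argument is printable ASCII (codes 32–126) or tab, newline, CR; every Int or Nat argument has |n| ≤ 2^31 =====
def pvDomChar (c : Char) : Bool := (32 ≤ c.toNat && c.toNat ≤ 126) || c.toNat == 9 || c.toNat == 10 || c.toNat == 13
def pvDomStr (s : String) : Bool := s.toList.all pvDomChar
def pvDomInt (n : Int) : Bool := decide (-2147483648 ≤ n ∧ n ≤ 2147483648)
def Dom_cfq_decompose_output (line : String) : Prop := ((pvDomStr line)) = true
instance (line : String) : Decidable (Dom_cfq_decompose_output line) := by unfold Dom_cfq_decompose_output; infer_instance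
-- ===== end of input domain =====

-- B is an index-then-slice decomposition (locate the first "{" and the first following "}",
-- slice the token list, join each group once) instead of A's one-token-at-a-time state machine;
-- objective: simpler.

-- ===== PORT A =====
-- the body of A's for-loop: state is (prefix, triplets_text, postfix, state)
def pvStepA : (String × String × String × Int) → String → (String × String × String × Int)
  | (pre, trip, post, state), token =>
    if state = 0 then
      if token = "{" then (pre ++ token ++ " ", trip, post, 1)
      else (pre ++ token ++ " ", trip, post, state)
    else if state = 1 then
      if token = "}" then (pre, trip, post ++ token ++ " ", 2)
      else (pre, trip ++ token ++ " ", post, state)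
    else (pre, trip, post ++ token ++ " ", state)

def cfq_decompose_output (line : String) : String × List String × String :=
  -- line.split(" "): separator " " is nonempty, so split? never raises; .getD [] unwraps
  let tokens := (PySem.Str.split? line " ").getD []
  let fin := tokens.foldl pvStepA ("", "", "", 0)
  -- triplets_text.strip().split(" . "): separator " . " nonempty, split? never raises
  (fin.1, (PySem.Str.split? (PySem.Str.strip fin.2.1) " . ").getD [], fin.2.2.1)

-- ===== PORT B =====
def cfq_decompose_output_alt (line : String) : String × List String × String :=
  let tokens := (PySem.Str.split? line " ").getD []
  -- 'if "{" in tokens: i = tokens.index("{")' ported as one match on index? (some i ↔ "{" in tokens);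
  -- slices tokens[:i+1] / tokens[i+1:] with nonnegative bounds are take / drop
  let groups : List String × List String × List String :=
    match PySem.List.index? tokens "{" with
    | none => (tokens, [], [])
    | some i =>
      let rest := tokens.drop (i + 1)
      match PySem.List.index? rest "}" with
      | none => (tokens.take (i + 1), rest, [])
      | some j => (tokens.take (i + 1), rest.take j, rest.drop j)
  let pre := PySem.Str.join " " groups.1 ++ " "
  let post := if groups.2.2.isEmpty then "" else PySem.Str.join " " groups.2.2 ++ " "
  let trips := (PySem.Str.split? (PySem.Str.strip (PySem.Str.join " " groups.2.1)) " . ").getD []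
  (pre, trips, post)

-- ===== PRECONDITION & SPEC =====
def Spec_cfq_decompose_output (line : String) (out : String × List String × String) : Prop := out = cfq_decompose_output_alt line
instance (line : String) (out : String × List String × String) : Decidable (Spec_cfq_decompose_output line out) := by unfold Spec_cfq_decompose_output; infer_instance

-- ===== CLAIM (what is proved, stated in full; the proofs are below) =====
def Claim_equal_cfq_decompose_output : Prop := ∀ (line : String), Dom_cfq_decompose_output line → Spec_cfq_decompose_output line (cfq_decompose_output line)

-- ===== LEMMAS AND PROOFS =====

-- concatenation of token ++ " " over a token group, the shape A's loop accumulates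
def pvJoinSp : List String → String
  | [] => ""
  | t :: r => t ++ " " ++ pvJoinSp r

-- closed form of A's state machine on a token list
def pvSpec (ts : List String) : String × String × String × Int :=
  match PySem.List.index? ts "{" with
  | none => (pvJoinSp ts, "", "", 0)
  | some i =>
    match PySem.List.index? (ts.drop (i + 1)) "}" with
    | none => (pvJoinSp (ts.take (i + 1)), pvJoinSp (ts.drop (i + 1)), "", 1)
    | some j => (pvJoinSp (ts.take (i + 1)), pvJoinSp ((ts.drop (i + 1)).take j),
                 pvJoinSp ((ts.drop (i + 1)).drop j), 2)

lemma pvStepA_two (p t q x : String) : pvStepA (p, t, q, 2) x = (p, t, q ++ x ++ " ", 2) := by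
  norm_num [pvStepA]

lemma pvStepA_one_close (p t q : String) : pvStepA (p, t, q, 1) "}" = (p, t, q ++ "}" ++ " ", 2) := by
  norm_num [pvStepA]

lemma pvStepA_one_other (p t q x : String) (h : x ≠ "}") :
    pvStepA (p, t, q, 1) x = (p, t ++ x ++ " ", q, 1) := by
  norm_num [pvStepA, h]

lemma pvStepA_zero_open (p t q : String) : pvStepA (p, t, q, 0) "{" = (p ++ "{" ++ " ", t, q, 1) := by
  norm_num [pvStepA]

lemma pvStepA_zero_other (p t q x : String) (h : x ≠ "{") :
    pvStepA (p, t, q, 0) x = (p ++ x ++ " ", t, q, 0) := by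
  norm_num [pvStepA, h]

lemma pvFold_two (ts : List String) : ∀ p t q : String,
    ts.foldl pvStepA (p, t, q, 2) = (p, t, q ++ pvJoinSp ts, 2) := by
  induction ts with
  | nil => intro p t q; simp [pvJoinSp]
  | cons x r ih =>
    intro p t q
    rw [List.foldl_cons, pvStepA_two, ih]
    simp [pvJoinSp, String.append_assoc]

lemma pvFold_one (ts : List String) : ∀ p t q : String,
    ts.foldl pvStepA (p, t, q, 1) =
      match PySem.List.index? ts "}" with
      | none => (p, t ++ pvJoinSp ts, q, 1)
      | some j => (p, t ++ pvJoinSp (ts.take j), q ++ pvJoinSp (ts.drop j), 2) := by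
  induction ts with
  | nil => intro p t q; simp [pvJoinSp, PySem.List.index?]
  | cons x r ih =>
    intro p t q
    by_cases hx : x = "}"
    · subst hx
      rw [PySem.List.index?_cons_self]
      rw [List.foldl_cons, pvStepA_one_close, pvFold_two]
      simp [pvJoinSp, String.append_assoc]
    · rw [PySem.List.index?_cons_of_ne r hx]
      rw [List.foldl_cons, pvStepA_one_other _ _ _ _ hx, ih]
      cases hj : PySem.List.index? r "}" with
      | none => simp [pvJoinSp, String.append_assoc]
      | some j => simp [pvJoinSp, String.append_assoc, List.take_succ_cons, List.drop_succ_cons]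

lemma pvFold_zero (ts : List String) : ∀ p t q : String,
    ts.foldl pvStepA (p, t, q, 0) =
      (p ++ (pvSpec ts).1, t ++ (pvSpec ts).2.1, q ++ (pvSpec ts).2.2.1, (pvSpec ts).2.2.2) := by
  induction ts with
  | nil => intro p t q; simp [pvSpec, pvJoinSp, PySem.List.index?]
  | cons x r ih =>
    intro p t q
    by_cases hx : x = "{"
    · subst hx
      rw [List.foldl_cons, pvStepA_zero_open, pvFold_one]
      unfold pvSpec
      rw [PySem.List.index?_cons_self]
      simp only [List.drop_succ_cons, List.drop_zero, List.take_succ_cons, List.take_zero]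
      cases PySem.List.index? r "}" with
      | none => simp [pvJoinSp, String.append_assoc]
      | some j => simp [pvJoinSp, String.append_assoc]
    · rw [List.foldl_cons, pvStepA_zero_other _ _ _ _ hx, ih]
      unfold pvSpec
      rw [PySem.List.index?_cons_of_ne r hx]
      cases hi : PySem.List.index? r "{" with
      | none => simp [pvJoinSp, String.append_assoc]
      | some i =>
        simp only [Option.map_some]
        rw [show i + 1 + 1 = i + 1 + 1 from rfl]
        simp only [List.take_succ_cons, List.drop_succ_cons]
        cases hj : PySem.List.index? (List.drop (i + 1) r) "}" with
        | none => simp [pvJoinSp, String.append_assoc]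
        | some j => simp [pvJoinSp, String.append_assoc]

-- pvJoinSp is " ".join plus one trailing space, on a nonempty group
lemma pvJoinSp_toList (ts : List String) (h : ts ≠ []) :
    (pvJoinSp ts).toList = PySem.Chars.join [' '] (ts.map String.toList) ++ [' '] := by
  induction ts with
  | nil => cases h rfl
  | cons x r ih =>
    cases r with
    | nil => simp [pvJoinSp, PySem.Chars.join_singleton]
    | cons y r' =>
      rw [show pvJoinSp (x :: y :: r') = x ++ " " ++ pvJoinSp (y :: r') from rfl]
      simp only [List.map_cons, PySem.Chars.join_cons_cons]
      rw [String.toList_append, String.toList_append, ih (by simp)]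
      simp

lemma pvJoinSp_eq (ts : List String) (h : ts ≠ []) :
    pvJoinSp ts = PySem.Str.join " " ts ++ " " := by
  apply String.ext
  rw [pvJoinSp_toList ts h, String.toList_append, PySem.Str.toList_join]
  rfl

lemma pvJoin_nil : PySem.Str.join " " ([] : List String) = "" := by
  apply String.ext
  rw [PySem.Str.toList_join]
  simp [PySem.Chars.join_nil]

lemma pvRstrip_space (cs : List Char) :
    PySem.Chars.rstrip (cs ++ [' ']) = PySem.Chars.rstrip cs := by
  simp [PySem.Chars.rstrip, List.reverse_append,
        show PySem.Chars.isspace ' ' = true from rfl]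

lemma pvStrip_space (s : String) : PySem.Str.strip (s ++ " ") = PySem.Str.strip s := by
  apply String.ext
  rw [PySem.Str.toList_strip, PySem.Str.toList_strip, String.toList_append,
      show (" " : String).toList = [' '] from rfl]
  simp only [PySem.Chars.strip, PySem.Chars.lstrip]
  rw [List.dropWhile_append]
  split_ifs with hemp
  · have h' : List.dropWhile PySem.Chars.isspace s.toList = [] := by
      simpa [List.isEmpty_iff] using hemp
    rw [h']
    simp [PySem.Chars.rstrip, show PySem.Chars.isspace ' ' = true from rfl]
  · exact pvRstrip_space _

lemma pvStrip_joinSp (l : List String) :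
    PySem.Str.strip (pvJoinSp l) = PySem.Str.strip (PySem.Str.join " " l) := by
  cases l with
  | nil => rw [pvJoin_nil]; rfl
  | cons x r => rw [pvJoinSp_eq _ (by simp), pvStrip_space]

-- str.split(" ") never returns an empty list
lemma pvGo_ne_nil (sep : List Char) (fuel : Nat) :
    ∀ (l cur : List Char) (acc : List (List Char)),
      PySem.Chars.splitOn.go sep fuel l cur acc ≠ [] := by
  induction fuel with
  | zero => intro l cur acc; simp [PySem.Chars.splitOn.go]
  | succ n ih =>
    intro l cur acc
    cases l with
    | nil => simp [PySem.Chars.splitOn.go]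
    | cons c rest =>
      rw [show PySem.Chars.splitOn.go sep (n + 1) (c :: rest) cur acc =
            if sep.isPrefixOf (c :: rest) then
              PySem.Chars.splitOn.go sep n (List.drop sep.length (c :: rest)) [] (cur.reverse :: acc)
            else PySem.Chars.splitOn.go sep n rest (c :: cur) acc from rfl]
      split_ifs <;> apply ih

lemma pvTokens_ne_nil (s : String) : (PySem.Str.split? s " ").getD [] ≠ [] := by
  have h := PySem.Str.split?_map s " "
  rw [show (" " : String).toList = [' '] from rfl] at h
  rw [show PySem.Chars.split? s.toList [' ']
        = some (PySem.Chars.splitOn s.toList [' ']) from rfl] at h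
  cases hs : PySem.Str.split? s " " with
  | none => rw [hs] at h; simp at h
  | some l =>
    rw [hs] at h
    simp only [Option.map_some, Option.some.injEq] at h
    intro hl
    rw [Option.getD_some] at hl
    subst hl
    simp only [List.map_nil] at h
    exact pvGo_ne_nil _ _ _ _ _ h.symm

lemma pvMain (line : String) : cfq_decompose_output line = cfq_decompose_output_alt line := by
  unfold cfq_decompose_output cfq_decompose_output_alt
  simp only []
  set ts := (PySem.Str.split? line " ").getD [] with hts
  have hne : ts ≠ [] := pvTokens_ne_nil line
  rw [pvFold_zero]
  cases hi : PySem.List.index? ts "{" with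
  | none =>
    simp only [pvSpec, hi]
    rw [pvJoinSp_eq ts hne, pvJoin_nil]
    simp
  | some i =>
    have htk : ts.take (i + 1) ≠ [] := by
      intro hnil
      rcases List.take_eq_nil_iff.mp hnil with h1 | h1
      · omega
      · exact hne h1
    cases hj : PySem.List.index? (ts.drop (i + 1)) "}" with
    | none =>
      simp only [pvSpec, hi, hj]
      rw [pvJoinSp_eq _ htk]
      simp only [String.empty_append, String.append_empty]
      rw [pvStrip_joinSp]
      simp
    | some j =>
      have hlen : i + 1 + j < ts.length := by
        obtain ⟨hk, -, -⟩ := PySem.List.getElem_of_index?_eq_some hj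
        rw [List.length_drop] at hk
        omega
      have hdj : (ts.drop (i + 1)).drop j ≠ [] := by
        intro hnil
        rw [List.drop_eq_nil_iff, List.length_drop] at hnil
        omega
      simp only [pvSpec, hi, hj]
      rw [pvJoinSp_eq _ htk]
      simp only [String.empty_append]
      rw [pvStrip_joinSp, pvJoinSp_eq _ hdj]
      simp [List.isEmpty_iff, hlen]

-- ===== VERDICT (by name: the statement is the Claim_ definition above) =====
theorem cfq_decompose_output_spec : Claim_equal_cfq_decompose_output := by
  intro line _
  unfold Spec_cfq_decompose_output
  exact pvMain line
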